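-- pv_equiv track=rewrite | github.com/ringier-data/nannos | packages/console-backend/playground_backend/catalog/adapters/google_drive.py | _is_under_folder
-- ===== SOURCE A (Python) =====
-- def _is_under_folder(
--
--     parent_ids: list[str],
--     target_folder_id: str,
--     folder_map: dict[str, dict],
-- ) -> bool:
--     """Check if a file is under (descendant of) a target folder."""
--     visited: set[str] = set()
--     for pid in parent_ids:
--         current = pid
--         while current and current not in visited:
--             if current == target_folder_id:
--                 return True
--             visited.add(current)
--             parent_info = folder_map.get(current, {})
--             current = parent_info.get("parent_id")
--     return False
-- ===== SOURCE B (Python) =====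
-- def _is_under_folder(
--     parent_ids: list[str],
--     target_folder_id: str,
--     folder_map: dict[str, dict],
-- ) -> bool:
--     """Check if a file is under (descendant of) a target folder."""
--     if not target_folder_id:
--         return False
--     # Fixpoint closure: collect every folder whose parent chain leads to the
--     # target, by repeatedly adding folders whose parent is already collected.
--     reach = {target_folder_id}
--     changed = True
--     while changed:
--         changed = False
--         for folder_id, info in folder_map.items():
--             if folder_id and folder_id not in reach and info.get("parent_id") in reach:
--                 reach.add(folder_id)
--                 changed = True
--     return any(pid in reach for pid in parent_ids)
-- ===== Notes on version B (the rewrite author's own statement) =====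
-- stated objective: alternative
-- what changed: Replaces A's per-file upward climb of parent chains (outer loop over parent_ids, inner while-loop with a shared visited set) by a bottom-up fixpoint that computes the set of all descendants of the target folder from the folder map and then tests each parent id for membership.
import Mathlib
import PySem

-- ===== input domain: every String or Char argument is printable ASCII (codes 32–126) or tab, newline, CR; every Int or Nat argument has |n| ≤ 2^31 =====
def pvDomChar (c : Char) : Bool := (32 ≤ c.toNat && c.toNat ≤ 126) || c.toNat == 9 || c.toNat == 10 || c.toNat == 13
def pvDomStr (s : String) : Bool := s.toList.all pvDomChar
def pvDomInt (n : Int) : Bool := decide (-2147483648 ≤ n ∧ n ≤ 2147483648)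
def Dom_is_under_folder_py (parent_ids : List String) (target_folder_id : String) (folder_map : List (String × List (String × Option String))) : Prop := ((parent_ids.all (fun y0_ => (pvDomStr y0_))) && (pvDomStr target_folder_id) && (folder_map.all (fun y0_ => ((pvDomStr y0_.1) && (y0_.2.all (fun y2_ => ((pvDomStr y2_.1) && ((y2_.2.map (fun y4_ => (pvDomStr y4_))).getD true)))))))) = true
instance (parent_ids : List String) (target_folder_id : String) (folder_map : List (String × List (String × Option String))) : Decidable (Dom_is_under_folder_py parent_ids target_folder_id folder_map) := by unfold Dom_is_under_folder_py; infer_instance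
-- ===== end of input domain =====

-- B replaces A's upward parent-chain climbs by a bottom-up fixpoint computing the
-- target's descendant set from the folder map, then a membership test (objective: alternative).

-- folder_map.get(current, {}).get("parent_id")   (shared lookup helper of both ports)
def pvParent (folder_map : List (String × List (String × Option String))) (s : String) : Option String :=
  match (PySem.Dict.mk folder_map).get? s with
  | none => none
  | some d => ((PySem.Dict.mk d).get? "parent_id").join

-- termination measure for A's parent-chain climb (proof artefact, cited by decreasing_by)
def pvGas (folder_map : List (String × List (String × Option String))) (x : Option String) (V : List String) : ℕ :=
  2 * (((PySem.List.dedup (folder_map.map Prod.fst))).filter (fun k => decide (k ∉ V))).length +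
  x.elim 0 (fun s => if s ∈ PySem.List.dedup (folder_map.map Prod.fst) then 0 else 1)

theorem pv_filter_length_le {α : Type} (l : List α) (p q : α → Bool)
    (himp : ∀ a, q a = true → p a = true) : (l.filter q).length ≤ (l.filter p).length := by
  induction l with
  | nil => simp
  | cons b t ih =>
    by_cases hq : q b = true
    · have hp := himp b hq
      simp [hq, hp, ih]
    · have hq' : q b = false := by simpa using hq
      by_cases hp : p b = true <;> simp [hq', hp] <;> omega

theorem pv_filter_length_lt {α : Type} (l : List α) (p q : α → Bool)
    (himp : ∀ a, q a = true → p a = true) (a : α) (ha : a ∈ l)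
    (hpa : p a = true) (hqa : q a = false) :
    (l.filter q).length < (l.filter p).length := by
  induction l with
  | nil => cases ha
  | cons b t ih =>
    rcases List.mem_cons.mp ha with rfl | hat
    · have := pv_filter_length_le t p q himp
      simp [hqa, hpa]; omega
    · by_cases hq : q b = true
      · have hp := himp b hq
        simp [hq, hp]; exact ih hat
      · have hq' : q b = false := by simpa using hq
        have := ih hat
        by_cases hp : p b = true <;> simp [hq', hp] <;> omega

theorem pvGas_lt (folder_map : List (String × List (String × Option String)))
    (s : String) (V : List String) (hV : s ∉ V) :
    pvGas folder_map (pvParent folder_map s) (PySem.Set.add V s) < pvGas folder_map (some s) V := by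
  have hadd : ∀ a : String, a ∈ PySem.Set.add V s ↔ a ∈ V ∨ a = s := by
    intro a; simp [PySem.Set.mem_add]
  have himp : ∀ a : String, decide (a ∉ PySem.Set.add V s) = true → decide (a ∉ V) = true := by
    intro a h
    simp only [decide_eq_true_eq] at h ⊢
    intro hmem; exact h ((hadd a).mpr (Or.inl hmem))
  by_cases hk : s ∈ PySem.List.dedup (folder_map.map Prod.fst)
  · -- s is a key: the unvisited-keys count strictly drops
    have hlt : (((PySem.List.dedup (folder_map.map Prod.fst))).filter
          (fun k => decide (k ∉ PySem.Set.add V s))).length <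
        (((PySem.List.dedup (folder_map.map Prod.fst))).filter (fun k => decide (k ∉ V))).length := by
      refine pv_filter_length_lt _ _ _ himp s hk (by simpa using hV) ?_
      simp [hadd]
    have hd' : (pvParent folder_map s).elim 0
        (fun s' => if s' ∈ PySem.List.dedup (folder_map.map Prod.fst) then 0 else 1) ≤ 1 := by
      cases pvParent folder_map s with
      | none => simp
      | some s' => simp only [Option.elim_some]; split <;> omega
    unfold pvGas
    simp only [Option.elim_some]
    rw [if_pos hk]
    omega
  · -- s is not a key: the lookup fails, next node is none
    have hnone : pvParent folder_map s = none := by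
      have : (PySem.Dict.mk folder_map).get? s = none := by
        rw [PySem.Dict.get?_eq_none_iff_not_mem_keys]
        intro hmem
        exact hk (by rw [PySem.List.mem_dedup]; simpa [PySem.Dict.keys_mk] using hmem)
      simp [pvParent, this]
    have heq : (((PySem.List.dedup (folder_map.map Prod.fst))).filter
          (fun k => decide (k ∉ PySem.Set.add V s))) =
        (((PySem.List.dedup (folder_map.map Prod.fst))).filter (fun k => decide (k ∉ V))) := by
      apply List.filter_congr
      intro k hkmem
      have hks : k ≠ s := fun h => hk (h ▸ hkmem)
      simp [hadd, hks]
    unfold pvGas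
    rw [hnone, heq]
    simp only [Option.elim_none, Option.elim_some]
    rw [if_neg hk]
    omega

-- ===== PORT A =====
-- inner 'while current and current not in visited' loop, threading visited
def pvWhileA (target : String) (folder_map : List (String × List (String × Option String)))
    (x : Option String) (V : PySem.Set String) : Bool × PySem.Set String :=
  match x with
  | none => (false, V)
  | some s =>
    if _h1 : s = "" then (false, V)
    else if _h2 : PySem.Set.contains V s then (false, V)
    else if s = target then (true, V)
    else pvWhileA target folder_map (pvParent folder_map s) (PySem.Set.add V s)
termination_by pvGas folder_map x V
decreasing_by
  exact pvGas_lt folder_map s V (by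
    intro hmem
    exact _h2 (by simpa [PySem.Set.contains_eq_listContains] using hmem))

-- outer 'for pid in parent_ids' loop with early return True
def pvForA (target : String) (folder_map : List (String × List (String × Option String))) :
    List String → PySem.Set String → Bool
  | [], _ => false
  | pid :: rest, V =>
    match pvWhileA target folder_map (some pid) V with
    | (true, _) => true
    | (false, V') => pvForA target folder_map rest V'

def is_under_folder_py (parent_ids : List String) (target_folder_id : String) (folder_map : List (String × List (String × Option String))) : Bool :=
  pvForA target_folder_id folder_map parent_ids PySem.Set.empty

-- ===== PORT B =====
-- the loop condition 'folder_id and folder_id not in reach and info.get("parent_id") in reach'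
def pvAddable (folder_map : List (String × List (String × Option String)))
    (reach : PySem.Set String) (k : String) : Bool :=
  !(k == "") && !(PySem.Set.contains reach k) &&
    (match pvParent folder_map k with
     | some p => PySem.Set.contains reach p
     | none => false)

-- one 'for folder_id, info in folder_map.items()' pass, returning (reach, changed)
def pvPass (folder_map : List (String × List (String × Option String))) :
    List String → PySem.Set String → PySem.Set String × Bool
  | [], reach => (reach, false)
  | k :: rest, reach =>
    if pvAddable folder_map reach k then
      ((pvPass folder_map rest (PySem.Set.add reach k)).1, true)
    else pvPass folder_map rest reach

-- measure facts the 'while changed' fixpoint needs for termination (cited by decreasing_by)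
theorem pvPass_mono (folder_map : List (String × List (String × Option String))) :
    ∀ (keys : List String) (reach : PySem.Set String) (v : String),
    v ∈ reach → v ∈ (pvPass folder_map keys reach).1 := by
  intro keys
  induction keys with
  | nil => intro reach v hv; simpa [pvPass] using hv
  | cons k rest ih =>
    intro reach v hv
    by_cases h : pvAddable folder_map reach k = true
    · simp only [pvPass, if_pos h]
      exact ih (PySem.Set.add reach k) v (by simp [PySem.Set.mem_add, hv])
    · simp only [pvPass, if_neg h]
      exact ih reach v hv

theorem pvPass_changed (folder_map : List (String × List (String × Option String))) :
    ∀ (keys : List String) (reach : PySem.Set String),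
    (pvPass folder_map keys reach).2 = true →
    ∃ k ∈ keys, k ∉ reach ∧ k ∈ (pvPass folder_map keys reach).1 := by
  intro keys
  induction keys with
  | nil => intro reach h; simp [pvPass] at h
  | cons k rest ih =>
    intro reach h
    by_cases ha : pvAddable folder_map reach k = true
    · refine ⟨k, List.mem_cons_self, ?_, ?_⟩
      · have ha' := ha
        unfold pvAddable at ha'
        simp at ha'
        exact ha'.1.2
      · simp only [pvPass, if_pos ha]
        exact pvPass_mono folder_map rest (PySem.Set.add reach k) k
          (by simp [PySem.Set.mem_add])
    · simp only [pvPass, if_neg ha] at h ⊢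
      obtain ⟨k', hk', hnr, hin⟩ := ih reach h
      exact ⟨k', List.mem_cons_of_mem _ hk', hnr, hin⟩

-- 'while changed' fixpoint loop
def pvFix (folder_map : List (String × List (String × Option String)))
    (keys : List String) (reach : PySem.Set String) : PySem.Set String :=
  let r := pvPass folder_map keys reach
  if _h : r.2 = true then pvFix folder_map keys r.1 else r.1
termination_by (keys.filter (fun k => decide (k ∉ reach))).length
decreasing_by
  obtain ⟨k, hk, hnr, hin⟩ := pvPass_changed folder_map keys reach _h
  exact pv_filter_length_lt keys (fun k => decide (k ∉ reach))
    (fun k => decide (k ∉ (pvPass folder_map keys reach).1))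
    (by
      intro a h
      simp only [decide_eq_true_eq] at h ⊢
      intro hmem; exact h (pvPass_mono folder_map keys reach a hmem))
    k hk (by simpa using hnr) (by simpa using hin)

def is_under_folder_py_alt (parent_ids : List String) (target_folder_id : String) (folder_map : List (String × List (String × Option String))) : Bool :=
  if target_folder_id = "" then false
  else
    let reach := pvFix folder_map (PySem.List.dedup (folder_map.map Prod.fst))
      (PySem.Set.add PySem.Set.empty target_folder_id)
    parent_ids.any (fun pid => PySem.Set.contains reach pid)

-- ===== PRECONDITION & SPEC =====
def Spec_is_under_folder_py (parent_ids : List String) (target_folder_id : String) (folder_map : List (String × List (String × Option String))) (out : Bool) : Prop := out = is_under_folder_py_alt parent_ids target_folder_id folder_map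
instance (parent_ids : List String) (target_folder_id : String) (folder_map : List (String × List (String × Option String))) (out : Bool) : Decidable (Spec_is_under_folder_py parent_ids target_folder_id folder_map out) := by unfold Spec_is_under_folder_py; infer_instance

-- ===== CLAIM (what is proved, stated in full; the proofs are below) =====
def Claim_equal_is_under_folder_py : Prop := ∀ (parent_ids : List String) (target_folder_id : String) (folder_map : List (String × List (String × Option String))), Dom_is_under_folder_py parent_ids target_folder_id folder_map → Spec_is_under_folder_py parent_ids target_folder_id folder_map (is_under_folder_py parent_ids target_folder_id folder_map)

-- ===== LEMMAS AND PROOFS =====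

-- one step of the parent chain, as climbed by A's loop
def pvStepO (folder_map : List (String × List (String × Option String))) :
    Option String → Option String
  | none => none
  | some s => if s = "" then none else pvParent folder_map s

-- 'the chain from x hits the target'
def pvReach (target : String) (folder_map : List (String × List (String × Option String)))
    (x : Option String) : Prop :=
  target ≠ "" ∧ ∃ n, (pvStepO folder_map)^[n] x = some target

theorem pvStepO_iterate_none (folder_map : List (String × List (String × Option String))) (n : ℕ) :
    (pvStepO folder_map)^[n] none = none :=
  Function.iterate_fixed rfl n

theorem pvStepO_some (folder_map : List (String × List (String × Option String)))
    (s : String) (hs : s ≠ "") : pvStepO folder_map (some s) = pvParent folder_map s := by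
  simp [pvStepO, hs]

theorem pvReach_of_step (target : String) (folder_map : List (String × List (String × Option String)))
    (s : String) (hs : s ≠ "") (ht : target ≠ "")
    (h : pvReach target folder_map (pvParent folder_map s)) :
    pvReach target folder_map (some s) := by
  obtain ⟨-, n, hn⟩ := h
  refine ⟨ht, n + 1, ?_⟩
  rw [Function.iterate_succ_apply, pvStepO_some folder_map s hs]
  exact hn

theorem pv_not_contains (V : PySem.Set String) (s : String) (h : s ∉ V) :
    ¬ PySem.Set.contains V s = true := by
  simpa [PySem.Set.contains_eq_listContains] using h

theorem pvWhileA_complete (target : String) (folder_map : List (String × List (String × Option String)))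
    (n : ℕ) : ∀ (x : Option String) (V : PySem.Set String),
    (pvStepO folder_map)^[n] x = some target → target ≠ "" →
    (∀ i, i < n → (pvStepO folder_map)^[i] x ≠ some target) →
    (∀ i j, i < j → j ≤ n → (pvStepO folder_map)^[i] x ≠ (pvStepO folder_map)^[j] x) →
    (∀ i, i ≤ n → ∀ s, (pvStepO folder_map)^[i] x = some s → s ∉ V) →
    (pvWhileA target folder_map x V).1 = true := by
  induction n with
  | zero =>
    intro x V hn ht _ _ hdisj
    simp only [Function.iterate_zero, id] at hn
    subst hn
    have hV : target ∉ V := hdisj 0 (le_refl 0) target (by simp)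
    rw [pvWhileA, dif_neg ht, dif_neg (pv_not_contains V target hV), if_pos rfl]
  | succ n ih =>
    intro x V hn ht hmin hdist hdisj
    cases x with
    | none => rw [pvStepO_iterate_none] at hn; cases hn
    | some s =>
      have hs : s ≠ "" := by
        intro h; subst h
        have hnil : pvStepO folder_map (some "") = none := by simp [pvStepO]
        rw [Function.iterate_succ_apply, hnil, pvStepO_iterate_none] at hn
        cases hn
      have hsV : s ∉ V := hdisj 0 (Nat.zero_le _) s (by simp)
      have hst : s ≠ target := by
        intro h
        exact hmin 0 (Nat.succ_pos n) (by simp [h])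
      rw [pvWhileA, dif_neg hs, dif_neg (pv_not_contains V s hsV), if_neg hst]
      have hstep := pvStepO_some folder_map s hs
      apply ih (pvParent folder_map s) (PySem.Set.add V s)
      · rw [← hstep, ← Function.iterate_succ_apply]; exact hn
      · exact ht
      · intro i hi
        rw [← hstep, ← Function.iterate_succ_apply]
        exact hmin (i + 1) (Nat.succ_lt_succ hi)
      · intro i j hij hj
        rw [← hstep, ← Function.iterate_succ_apply, ← Function.iterate_succ_apply]
        exact hdist (i + 1) (j + 1) (Nat.succ_lt_succ hij) (Nat.succ_le_succ hj)
      · intro i hi v hv hmem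
        have hmem' : v ∈ V ∨ v = s := by simpa [PySem.Set.mem_add] using hmem
        rcases hmem' with hvV | hvs
        · exact hdisj (i + 1) (Nat.succ_le_succ hi) v
            (by rw [← hstep, ← Function.iterate_succ_apply] at hv; exact hv) hvV
        · subst hvs
          apply hdist 0 (i + 1) (Nat.succ_pos i) (Nat.succ_le_succ hi)
          rw [← hstep, ← Function.iterate_succ_apply] at hv
          simp [hv]

theorem pvWhileA_false (target : String) (folder_map : List (String × List (String × Option String))) :
    ∀ (x : Option String) (V : PySem.Set String),
    ¬ pvReach target folder_map x →
    (∀ v ∈ V, ¬ pvReach target folder_map (some v)) →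
    (pvWhileA target folder_map x V).1 = false ∧
      ∀ v ∈ (pvWhileA target folder_map x V).2, ¬ pvReach target folder_map (some v) := by
  intro x V
  induction x, V using pvWhileA.induct target folder_map with
  | case1 V => intro _ hV; rw [pvWhileA]; exact ⟨rfl, hV⟩
  | case2 V => intro _ hV; rw [pvWhileA, dif_pos rfl]; exact ⟨rfl, hV⟩
  | case3 V s h1 h2 => intro _ hV; rw [pvWhileA, dif_neg h1, dif_pos h2]; exact ⟨rfl, hV⟩
  | case4 V h1 h2 =>
    intro hx _
    exact absurd ⟨h1, 0, by simp⟩ hx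
  | case5 V s h1 h2 h3 ih =>
    intro hx hV
    have hx' : ¬ pvReach target folder_map (pvParent folder_map s) := by
      intro h
      by_cases ht : target = ""
      · exact h.1 ht
      · exact hx (pvReach_of_step target folder_map s h1 ht h)
    have hV' : ∀ v ∈ PySem.Set.add V s, ¬ pvReach target folder_map (some v) := by
      intro v hv
      have hv' : v ∈ V ∨ v = s := by simpa [PySem.Set.mem_add] using hv
      rcases hv' with hvV | hvs
      · exact hV v hvV
      · subst hvs; exact hx
    rw [pvWhileA, dif_neg h1, dif_neg h2, if_neg h3]
    exact ih hx' hV'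

theorem pvWhileA_spec (target : String) (folder_map : List (String × List (String × Option String)))
    (x : Option String) (V : PySem.Set String)
    (hV : ∀ v ∈ V, ¬ pvReach target folder_map (some v)) :
    ((pvWhileA target folder_map x V).1 = true ↔ pvReach target folder_map x) ∧
      ((pvWhileA target folder_map x V).1 = false →
        ∀ v ∈ (pvWhileA target folder_map x V).2, ¬ pvReach target folder_map (some v)) := by
  by_cases h : pvReach target folder_map x
  · obtain ⟨ht, hex⟩ := h
    have hfind := Nat.find_spec hex
    set n := Nat.find hex with hn
    have hmin : ∀ i, i < n → (pvStepO folder_map)^[i] x ≠ some target :=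
      fun i hi => Nat.find_min hex hi
    have hdist : ∀ i j, i < j → j ≤ n →
        (pvStepO folder_map)^[i] x ≠ (pvStepO folder_map)^[j] x := by
      intro i j hij hj heq
      apply hmin ((n - j) + i) (by omega)
      have h1 : (pvStepO folder_map)^[(n - j) + j] x = some target := by
        rw [show (n - j) + j = n by omega]; exact hfind
      rw [Function.iterate_add_apply] at h1 ⊢
      rw [← heq] at h1
      exact h1
    have hdisj : ∀ i, i ≤ n → ∀ s, (pvStepO folder_map)^[i] x = some s → s ∉ V := by
      intro i hi s hs hmem
      apply hV s hmem
      refine ⟨ht, n - i, ?_⟩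
      rw [← hs, ← Function.iterate_add_apply, show (n - i) + i = n by omega]
      exact hfind
    have htrue := pvWhileA_complete target folder_map n x V hfind ht hmin hdist hdisj
    refine ⟨⟨fun _ => ⟨ht, hex⟩, fun _ => htrue⟩, fun hf => ?_⟩
    rw [htrue] at hf; cases hf
  · obtain ⟨hfalse, hinv⟩ := pvWhileA_false target folder_map x V h hV
    refine ⟨⟨fun htr => ?_, fun hr => absurd hr h⟩, fun _ => hinv⟩
    rw [htr] at hfalse; cases hfalse

theorem pvForA_spec (target : String) (folder_map : List (String × List (String × Option String))) :
    ∀ (pids : List String) (V : PySem.Set String),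
    (∀ v ∈ V, ¬ pvReach target folder_map (some v)) →
    (pvForA target folder_map pids V = true ↔
      ∃ pid ∈ pids, pvReach target folder_map (some pid)) := by
  intro pids
  induction pids with
  | nil => intro V _; simp [pvForA]
  | cons pid rest ih =>
    intro V hV
    obtain ⟨hiff, hinv⟩ := pvWhileA_spec target folder_map (some pid) V hV
    rcases hp : pvWhileA target folder_map (some pid) V with ⟨b, V'⟩
    rw [hp] at hiff hinv
    rw [pvForA, hp]
    cases b with
    | true =>
      have hr : pvReach target folder_map (some pid) := hiff.mp rfl
      simp [hr]
    | false =>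
      have hnot : ¬ pvReach target folder_map (some pid) := fun h => by simpa using hiff.mpr h
      have hinv' : ∀ v ∈ V', ¬ pvReach target folder_map (some v) := by
        simpa using hinv rfl
      rw [show (match ((false : Bool), V') with
          | (true, _) => true
          | (false, V') => pvForA target folder_map rest V') =
          pvForA target folder_map rest V' from rfl]
      rw [ih V' hinv']
      simp [hnot]

-- ===== B-side lemmas =====

-- a node with a parent binding is a dict key
theorem pvParent_some_mem_keys (folder_map : List (String × List (String × Option String)))
    (s p : String) (h : pvParent folder_map s = some p) :
    s ∈ PySem.List.dedup (folder_map.map Prod.fst) := by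
  rw [PySem.List.mem_dedup]
  unfold pvParent at h
  rcases hg : (PySem.Dict.mk folder_map).get? s with _ | d
  · rw [hg] at h; cases h
  · have : ¬ (PySem.Dict.mk folder_map).get? s = none := by simp [hg]
    rw [PySem.Dict.get?_eq_none_iff_not_mem_keys] at this
    have := not_not.mp this
    simpa [PySem.Dict.keys_mk] using this

-- everything a pass adds can reach the target
theorem pvPass_sound (target : String) (folder_map : List (String × List (String × Option String))) :
    ∀ (keys : List String) (reach : PySem.Set String),
    (∀ v ∈ reach, pvReach target folder_map (some v)) →
    ∀ v ∈ (pvPass folder_map keys reach).1, pvReach target folder_map (some v) := by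
  intro keys
  induction keys with
  | nil => intro reach hR v hv; exact hR v (by simpa [pvPass] using hv)
  | cons k rest ih =>
    intro reach hR v hv
    by_cases ha : pvAddable folder_map reach k = true
    · simp only [pvPass, if_pos ha] at hv
      refine ih (PySem.Set.add reach k) ?_ v hv
      intro w hw
      rcases (by simpa [PySem.Set.mem_add] using hw : w ∈ reach ∨ w = k) with hwR | rfl
      · exact hR w hwR
      · -- k ≠ "" and parent(k) = some p with p ∈ reach
        unfold pvAddable at ha
        rcases hp : pvParent folder_map w with _ | p
        · rw [hp] at ha; simp at ha
        · rw [hp] at ha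
          simp at ha
          obtain ⟨⟨hw0, -⟩, hpmem⟩ := ha
          have hpR : pvReach target folder_map (some p) := hR p hpmem
          refine pvReach_of_step target folder_map w hw0 hpR.1 ?_
          rw [hp]; exact hpR
    · simp only [pvPass, if_neg ha] at hv
      exact ih reach hR v hv

-- an unchanged pass leaves reach alone and certifies closedness
theorem pvPass_fix (folder_map : List (String × List (String × Option String))) :
    ∀ (keys : List String) (reach : PySem.Set String),
    (pvPass folder_map keys reach).2 = false →
    (pvPass folder_map keys reach).1 = reach ∧
      ∀ k ∈ keys, pvAddable folder_map reach k = false := by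
  intro keys
  induction keys with
  | nil => intro reach _; exact ⟨rfl, by intro k h; cases h⟩
  | cons k rest ih =>
    intro reach h
    by_cases ha : pvAddable folder_map reach k = true
    · simp [pvPass, if_pos ha] at h
    · simp only [pvPass, if_neg ha] at h ⊢
      obtain ⟨heq, hall⟩ := ih reach h
      refine ⟨heq, ?_⟩
      intro k' hk'
      rcases List.mem_cons.mp hk' with rfl | hk'
      · simpa using ha
      · exact hall k' hk'

-- a closed reach set containing the target contains every node that reaches it
theorem pv_closed_complete (target : String) (folder_map : List (String × List (String × Option String)))
    (reach : PySem.Set String)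
    (htgt : target ∈ reach)
    (hclosed : ∀ k ∈ PySem.List.dedup (folder_map.map Prod.fst),
      pvAddable folder_map reach k = false) :
    ∀ (n : ℕ) (s : String), (pvStepO folder_map)^[n] (some s) = some target → s ∈ reach := by
  intro n
  induction n with
  | zero =>
    intro s hs
    simp only [Function.iterate_zero, id] at hs
    cases hs; exact htgt
  | succ n ih =>
    intro s hs
    rw [Function.iterate_succ_apply] at hs
    by_cases hs0 : s = ""
    · subst hs0
      rw [show pvStepO folder_map (some "") = none by simp [pvStepO],
        pvStepO_iterate_none] at hs
      cases hs
    · rw [pvStepO_some folder_map s hs0] at hs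
      rcases hp : pvParent folder_map s with _ | p
      · rw [hp, pvStepO_iterate_none] at hs; cases hs
      · rw [hp] at hs
        have hpR : p ∈ reach := ih p hs
        have hkey := pvParent_some_mem_keys folder_map s p hp
        have hcl := hclosed s hkey
        unfold pvAddable at hcl
        rw [hp] at hcl
        simp at hcl
        by_cases hc : s ∈ reach
        · exact hc
        · exact absurd hpR (hcl hs0 hc)

-- the fixpoint computes exactly the set of nodes that reach the target
theorem pvFix_spec (target : String) (folder_map : List (String × List (String × Option String))) :
    ∀ (reach : PySem.Set String),
    (∀ v ∈ reach, pvReach target folder_map (some v)) →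
    target ∈ reach →
    ∀ s, s ∈ pvFix folder_map (PySem.List.dedup (folder_map.map Prod.fst)) reach ↔
      pvReach target folder_map (some s) := by
  intro reach
  induction reach using pvFix.induct folder_map (PySem.List.dedup (folder_map.map Prod.fst)) with
  | case1 reach r hchanged ih =>
    intro hsound htgt s
    rw [pvFix, dif_pos hchanged]
    exact ih (pvPass_sound target folder_map _ reach hsound)
      (pvPass_mono folder_map _ reach target htgt) s
  | case2 reach r hchanged =>
    intro hsound htgt s
    rw [pvFix, dif_neg hchanged]
    have hch : (pvPass folder_map (PySem.List.dedup (folder_map.map Prod.fst)) reach).2 = false := by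
      simpa using hchanged
    obtain ⟨heq, hclosed⟩ := pvPass_fix folder_map _ reach hch
    rw [heq]
    constructor
    · exact hsound s
    · rintro ⟨ht, n, hn⟩
      exact pv_closed_complete target folder_map reach htgt hclosed n s hn

-- ===== VERDICT (by name: the statement is the Claim_ definition above) =====
theorem is_under_folder_py_spec : Claim_equal_is_under_folder_py := by
  intro parent_ids target folder_map _
  unfold Spec_is_under_folder_py is_under_folder_py is_under_folder_py_alt
  have hempty : ∀ v ∈ (PySem.Set.empty : PySem.Set String),
      ¬ pvReach target folder_map (some v) := by
    intro v hv; cases hv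
  have hA := pvForA_spec target folder_map parent_ids PySem.Set.empty hempty
  by_cases ht : target = ""
  · rw [if_pos ht]
    cases hx : pvForA target folder_map parent_ids PySem.Set.empty with
    | false => rfl
    | true =>
      obtain ⟨pid, -, hr⟩ := hA.mp hx
      exact absurd ht hr.1
  · rw [if_neg ht]
    have hstart : ∀ v ∈ PySem.Set.add PySem.Set.empty target,
        pvReach target folder_map (some v) := by
      intro v hv
      rcases (by simpa [PySem.Set.mem_add] using hv : v ∈ ([] : List String) ∨ v = target)
        with h | rfl
      · cases h
      · exact ⟨ht, 0, rfl⟩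
    have htgt : target ∈ PySem.Set.add PySem.Set.empty target := by
      simp
    have hfix := pvFix_spec target folder_map (PySem.Set.add PySem.Set.empty target) hstart htgt
    have hB : (parent_ids.any (fun pid => PySem.Set.contains
        (pvFix folder_map (PySem.List.dedup (folder_map.map Prod.fst))
          (PySem.Set.add PySem.Set.empty target)) pid)) = true ↔
        ∃ pid ∈ parent_ids, pvReach target folder_map (some pid) := by
      rw [List.any_eq_true]
      constructor
      · rintro ⟨pid, hmem, hc⟩
        exact ⟨pid, hmem, (hfix pid).mp
          (by simpa [PySem.Set.contains_eq_listContains] using hc)⟩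
      · rintro ⟨pid, hmem, hr⟩
        exact ⟨pid, hmem, by
          simpa [PySem.Set.contains_eq_listContains] using (hfix pid).mpr hr⟩
    rw [← hB] at hA
    by_cases hx : pvForA target folder_map parent_ids PySem.Set.empty = true
    · rw [hx]; exact (hA.mp hx).symm
    · rw [Bool.not_eq_true] at hx
      rw [hx]
      cases h2 : parent_ids.any (fun pid => PySem.Set.contains
          (pvFix folder_map (PySem.List.dedup (folder_map.map Prod.fst))
            (PySem.Set.add PySem.Set.empty target)) pid) with
      | false => rfl
      | true => rw [hA.mpr h2] at hx; cases hx
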